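-- pv_equiv track=rewrite | github.com/StenNellen/aipt-assignments-main | Assignment 2 Diagnose This/Python/heuristics.py | most_common_set_heuristic
-- ===== SOURCE A (Python) =====
-- def most_common_set_heuristic(conflict_sets):
--     """
--     Heuristic: Choose the conflict set with the most common element in the conflict sets.
--     """
--     counter = {}
--     for setthing in conflict_sets:
--         for item in setthing:
--             counter[item] = counter.get(item, 0) + 1
--
--
--     sorted_dict = dict(sorted(counter.items(), key=lambda item: item[1], reverse=True))
--     for setthingy in conflict_sets:
--         if list(sorted_dict.keys())[0] in setthingy:
--             return setthingy
-- ===== SOURCE B (Python) =====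
-- def most_common_set_heuristic(conflict_sets):
--     """
--     Heuristic: Choose the conflict set with the most common element in the conflict sets.
--     Single counting pass that also records the first set each item appears in;
--     the winner's first set is returned directly (no second scan over conflict_sets).
--     """
--     counter = {}
--     first_set = {}
--     for s in conflict_sets:
--         for item in s:
--             counter[item] = counter.get(item, 0) + 1
--             if item not in first_set:
--                 first_set[item] = s
--     winner = max(counter, key=counter.get)
--     return first_set[winner]
-- ===== Notes on version B (the rewrite author's own statement) =====
-- stated objective: alternative
-- what changed: A counts occurrences, sorts the whole counter by count and then rescans conflict_sets for the first set containing the top key; B records each item's first containing set during the single counting pass and returns first_set[argmax] directly, replacing the sort and the second scan by one max() pass over the counter.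
-- outside the precondition, e.g. on most_common_set_heuristic([]): A returns None, B raises ValueError
import Mathlib
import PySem

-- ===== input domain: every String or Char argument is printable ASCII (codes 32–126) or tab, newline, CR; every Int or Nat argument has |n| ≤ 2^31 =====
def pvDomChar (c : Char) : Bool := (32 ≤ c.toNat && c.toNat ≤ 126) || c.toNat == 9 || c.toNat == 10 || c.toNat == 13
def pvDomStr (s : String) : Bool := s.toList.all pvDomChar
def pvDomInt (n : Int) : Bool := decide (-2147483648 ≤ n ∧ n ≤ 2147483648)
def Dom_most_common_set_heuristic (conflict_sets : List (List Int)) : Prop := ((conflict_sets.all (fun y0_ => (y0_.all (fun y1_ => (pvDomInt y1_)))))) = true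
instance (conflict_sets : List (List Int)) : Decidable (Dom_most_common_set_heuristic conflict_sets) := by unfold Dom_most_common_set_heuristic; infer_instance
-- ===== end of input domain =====

-- B replaces A's sort of the counter plus second scan over conflict_sets by a single counting
-- pass that also records each item's first set, then a first-argmax lookup (objective: alternative).

-- ===== PORT A =====
-- two nested loops building counter, then sorted(counter.items(), key=item[1], reverse=True),
-- then a scan for the first set containing the top key
def most_common_set_heuristic (conflict_sets : List (List Int)) : List Int :=
  let counter : PySem.Dict Int Int := conflict_sets.foldl
    (fun c setthing => setthing.foldl (fun c item => c.insert item (c.getD item 0 + 1)) c)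
    PySem.Dict.empty
  let sortedItems := PySem.List.sorted counter.items (fun p => p.2) true
  match sortedItems.map Prod.fst with        -- list(sorted_dict.keys())
  | [] => []                                 -- Python: [0] raises IndexError here (outside Pre_)
  | top :: _ => (conflict_sets.find? (fun setthingy => setthingy.contains top)).getD []
                                             -- getD []: Python falls through to None only outside Pre_

-- ===== PORT B =====
-- one pass with two dicts (counter, first_set); winner = max(counter, key=counter.get)
def most_common_set_heuristic_alt (conflict_sets : List (List Int)) : List Int :=
  let st := conflict_sets.foldl
    (fun st s => s.foldl
      (fun (st : PySem.Dict Int Int × PySem.Dict Int (List Int)) item =>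
        (st.1.insert item (st.1.getD item 0 + 1),
         if st.2.contains item then st.2 else st.2.insert item s)) st)
    (PySem.Dict.empty, PySem.Dict.empty)
  match PySem.List.max? st.1.keys (fun k => st.1.getD k 0) with
  | none => []                               -- Python: max() raises ValueError here (outside Pre_)
  | some winner => st.2.getD winner []

-- ===== PRECONDITION & SPEC =====
-- Pre_ excludes the degenerate inputs with no conflict elements at all: on [] Python A returns
-- None (no value of the declared list type) and on non-empty lists of only empty sets it raises
-- IndexError; B raises ValueError on both.
def Pre_most_common_set_heuristic (conflict_sets : List (List Int)) : Prop :=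
  conflict_sets.flatten ≠ []
instance (conflict_sets : List (List Int)) : Decidable (Pre_most_common_set_heuristic conflict_sets) := by unfold Pre_most_common_set_heuristic; infer_instance
def pvWitness_most_common_set_heuristic : List (List Int) := [[1, 2], [2, 3]]

def Spec_most_common_set_heuristic (conflict_sets : List (List Int)) (out : List Int) : Prop := out = most_common_set_heuristic_alt conflict_sets
instance (conflict_sets : List (List Int)) (out : List Int) : Decidable (Spec_most_common_set_heuristic conflict_sets out) := by unfold Spec_most_common_set_heuristic; infer_instance

-- ===== CLAIM (what is proved, stated in full; the proofs are below) =====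
def Claim_equal_most_common_set_heuristic : Prop := ∀ (conflict_sets : List (List Int)), Dom_most_common_set_heuristic conflict_sets → Pre_most_common_set_heuristic conflict_sets → Spec_most_common_set_heuristic conflict_sets (most_common_set_heuristic conflict_sets)

-- ===== LEMMAS AND PROOFS =====

-- the pair fold of B is the pair of A's counter fold and the first_set fold
lemma pv_pairfold_eq (cs : List (List Int)) (c : PySem.Dict Int Int)
    (fs : PySem.Dict Int (List Int)) :
    cs.foldl (fun st s => s.foldl
        (fun (st : PySem.Dict Int Int × PySem.Dict Int (List Int)) item =>
          (st.1.insert item (st.1.getD item 0 + 1),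
           if st.2.contains item then st.2 else st.2.insert item s)) st) (c, fs)
    = (cs.foldl (fun c s => s.foldl (fun c item => c.insert item (c.getD item 0 + 1)) c) c,
       cs.foldl (fun fs s => s.foldl
         (fun (fs : PySem.Dict Int (List Int)) item =>
           if fs.contains item then fs else fs.insert item s) fs) fs) := by
  induction cs generalizing c fs with
  | nil => rfl
  | cons s rest ih =>
      simp only [List.foldl_cons]
      rw [PySem.List.foldl_prod_mk
            (f := fun (c : PySem.Dict Int Int) (item : Int) => c.insert item (c.getD item 0 + 1))
            (g := fun (fs : PySem.Dict Int (List Int)) (item : Int) =>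
              if fs.contains item then fs else fs.insert item s)]
      exact ih _ _

-- head of a foldl of insertBy evolves like a first-argmax fold
lemma pv_head?_foldl_insertBy {α : Type} (bef : α → α → Bool) (l : List α) (s : List α) :
    (l.foldl (fun acc x => PySem.List.insertBy bef x acc) s).head?
    = l.foldl (fun b x => match b with
        | none => some x
        | some m => if bef x m then some x else some m) s.head? := by
  induction l generalizing s with
  | nil => rfl
  | cons x l ih =>
      simp only [List.foldl_cons]
      rw [ih]
      congr 1
      cases s with
      | nil => rfl
      | cons y t =>
          simp only [PySem.List.insertBy, List.head?_cons]
          split <;> rfl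

-- the head of a reverse-sorted list is the first element of maximal key
lemma pv_head?_sorted_rev {α κ : Type} [LinearOrder κ] (xs : List α) (key : α → κ) :
    (PySem.List.sorted xs key true).head? = PySem.List.max? xs key := by
  rw [PySem.List.sorted_rev_eq_foldl_insertBy, pv_head?_foldl_insertBy]
  show _ = List.foldl _ none xs
  congr 1
  funext b x
  cases b with
  | none => rfl
  | some m => simp

-- max over a mapped list
lemma pv_max?_map {α β κ : Type} [LinearOrder κ] (f : α → β) (key : β → κ) (l : List α) :
    PySem.List.max? (l.map f) key = (PySem.List.max? l (fun a => key (f a))).map f := by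
  have aux : ∀ (l : List α) (acc : Option α),
      List.foldl (fun b y => match b with
        | none => some y
        | some m => if key m < key y then some y else some m) (acc.map f) (l.map f)
      = (List.foldl (fun b a => match b with
        | none => some a
        | some m => if key (f m) < key (f a) then some a else some m) acc l).map f := by
    intro l
    induction l with
    | nil => intro acc; rfl
    | cons a l ih =>
        intro acc
        simp only [List.map_cons, List.foldl_cons]
        have hstep : (match acc.map f with
            | none => some (f a)
            | some m => if key m < key (f a) then some (f a) else some m)
            = Option.map f (match acc with
            | none => some a
            | some m => if key (f m) < key (f a) then some a else some m) := by
          cases acc with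
          | none => rfl
          | some m => simp only [Option.map_some]; split <;> rfl
        rw [hstep, ih]
  have h := aux l none
  simpa [PySem.List.max?] using h

-- first_set inner loop lookup
lemma pv_innerF_get? (l v : List Int) (k : Int) :
    ∀ fs : PySem.Dict Int (List Int),
    (l.foldl (fun (fs : PySem.Dict Int (List Int)) item =>
        if fs.contains item then fs else fs.insert item v) fs).get? k
    = if (fs.get? k).isSome then fs.get? k else if k ∈ l then some v else none := by
  induction l with
  | nil =>
      intro fs
      simp only [List.foldl_nil, List.not_mem_nil, if_false]
      cases h : fs.get? k <;> simp
  | cons i rest ih =>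
      intro fs
      simp only [List.foldl_cons]
      rw [ih]
      by_cases hci : fs.contains i
      · simp only [hci, if_true]
        by_cases hk : (fs.get? k).isSome
        · simp [hk]
        · simp only [hk]
          have hki : k ≠ i := by
            intro h; subst h
            rw [PySem.Dict.contains_eq_isSome_get?] at hci
            exact hk hci
          simp [List.mem_cons, hki]
      · simp only [if_neg hci]
        by_cases hki : k = i
        · subst hki
          have hnone : fs.get? k = none := by
            rw [PySem.Dict.get?_eq_none_iff_contains]
            simpa using hci
          simp [PySem.Dict.get?_insert_self, hnone]
        · rw [PySem.Dict.get?_insert_of_ne fs v hki]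
          simp [List.mem_cons, hki]

-- first_set lookup is exactly A's "first set containing k" scan
lemma pv_build_get? (cs : List (List Int)) (k : Int) :
    ∀ fs : PySem.Dict Int (List Int),
    (cs.foldl (fun fs s => s.foldl
        (fun (fs : PySem.Dict Int (List Int)) item =>
          if fs.contains item then fs else fs.insert item s) fs) fs).get? k
    = if (fs.get? k).isSome then fs.get? k
      else cs.find? (fun s => s.contains k) := by
  induction cs with
  | nil =>
      intro fs
      simp only [List.foldl_nil, List.find?_nil]
      cases h : fs.get? k <;> simp
  | cons s rest ih =>
      intro fs
      simp only [List.foldl_cons]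
      rw [ih, pv_innerF_get? s s k fs]
      by_cases hk : (fs.get? k).isSome
      · simp [hk]
      · simp only [hk]
        by_cases hks : k ∈ s
        · simp [List.find?_cons_of_pos, hks]
        · simp only [hks, if_false, Option.isSome_none, Bool.false_eq_true]
          rw [List.find?_cons_of_neg (by simpa using hks)]

-- ===== VERDICT (by name: the statement is the Claim_ definition above) =====
theorem most_common_set_heuristic_spec : Claim_equal_most_common_set_heuristic := by
  intro cs _hdom hpre
  unfold Spec_most_common_set_heuristic
  unfold most_common_set_heuristic most_common_set_heuristic_alt
  simp only [pv_pairfold_eq]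
  have hcounter :
      cs.foldl (fun c s => s.foldl (fun c item => c.insert item (c.getD item 0 + 1)) c)
        PySem.Dict.empty = PySem.Dict.counter cs.flatten := by
    rw [← List.foldl_flatten]
    rfl
  rw [hcounter]
  have hL : cs.flatten ≠ [] := hpre
  set L := cs.flatten with hLdef
  -- keys and items of the counter
  have hkeys : (PySem.Dict.counter L).keys = PySem.Set.ofList L := PySem.Dict.keys_counter L
  have hitems : (PySem.Dict.counter L).items
      = (PySem.Set.ofList L).map (fun k => (k, (L.count k : Int))) := PySem.Dict.items_counter L
  -- the key functions agree
  have hkeyfun : (fun k => (PySem.Dict.counter L).getD k 0) = fun k => (L.count k : Int) := by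
    funext k
    exact PySem.Dict.getD_counter L k
  -- A's head = B's winner
  have hhead : ((PySem.List.sorted (PySem.Dict.counter L).items (fun p => p.2) true).map Prod.fst).head?
      = (((PySem.List.max? (PySem.Dict.counter L).keys
        (fun k => (PySem.Dict.counter L).getD k 0)).map (fun k => (k, (L.count k : Int)))).map Prod.fst) := by
    rw [List.head?_map, pv_head?_sorted_rev, hitems, hkeys, hkeyfun,
        pv_max?_map (fun k => (k, (L.count k : Int))) (fun p => p.2) (PySem.Set.ofList L)]
  -- the winner exists: L is non-empty
  have hone : ∃ x, x ∈ PySem.Set.ofList L := by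
    obtain ⟨x, hx⟩ := List.exists_mem_of_ne_nil _ hL
    exact ⟨x, (PySem.Set.mem_ofList _ _).2 hx⟩
  obtain ⟨x, hx⟩ := hone
  have hset_ne : PySem.Set.ofList L ≠ [] := List.ne_nil_of_mem hx
  have hmax_ne : PySem.List.max? (PySem.Dict.counter L).keys
      (fun k => (PySem.Dict.counter L).getD k 0) ≠ none := by
    rw [Ne, PySem.List.max?_eq_none_iff, hkeys]
    exact hset_ne
  obtain ⟨w, hw⟩ := Option.ne_none_iff_exists'.1 hmax_ne
  rw [hw]
  -- rewrite A's match scrutinee through hhead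
  have hAscrut : (PySem.List.sorted (PySem.Dict.counter L).items (fun p => p.2) true).map Prod.fst
      = w :: ((PySem.List.sorted (PySem.Dict.counter L).items (fun p => p.2) true).map Prod.fst).tail := by
    have h1 : ((PySem.List.sorted (PySem.Dict.counter L).items (fun p => p.2) true).map Prod.fst).head?
        = some w := by
      rw [hhead, hw]; rfl
    exact (List.head?_eq_some_iff.1 h1).elim (fun t ht => by rw [ht]; rfl)
  rw [hAscrut]
  -- both sides are now the same first-set lookup
  show (cs.find? (fun s => s.contains w)).getD [] = _
  dsimp only
  rw [PySem.Dict.getD_eq_get?_getD, pv_build_get? cs w PySem.Dict.empty]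
  simp [PySem.Dict.get?_empty]
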